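-- pv_equiv track=rewrite | github.com/junbeom-kang/Baekjoon | Graph/PetsAndToys.py | solution
-- ===== SOURCE A (Python) =====
-- def solution(P, T, A, B):
--     l=len(P)
--     m=len(A)
--     adj=[[]for _ in range(l)]
--     for i in range(m):
--         adj[A[i]].append(B[i])
--         adj[B[i]].append(A[i])
--     visited=[False]*l
--
--     for i in range(l):
--         if not visited[i]:
--             visited[i]=True
--             up=P[i]
--             down=T[i]
--             q=[i]
--             while q:
--                 v=q.pop()
--                 for e in adj[v]:
--                     if not visited[e]:
--                         visited[e]=True
--                         up+=P[e]
--                         down+=T[e]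
--                         q.append(e)
--             if up!=down:
--                 return False
--
--     return True
-- ===== SOURCE B (Python) =====
-- def solution(P, T, A, B):
--     l = len(P)
--     comp = list(range(l))
--     changed = True
--     while changed:
--         changed = False
--         for a, b in zip(A, B):
--             x, y = comp[a], comp[b]
--             if x < y:
--                 comp[b] = x
--                 changed = True
--             elif y < x:
--                 comp[a] = y
--                 changed = True
--     sums = {}
--     for i in range(l):
--         p, t = sums.get(comp[i], (0, 0))
--         sums[comp[i]] = (p + P[i], t + T[i])
--     return all(p == t for p, t in sums.values())
-- ===== Notes on version B (the rewrite author's own statement) =====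
-- stated objective: alternative
-- what changed: A does an explicit-stack DFS over an adjacency-list graph, checking each component's P/T sums as it discovers it; B never builds adjacency lists or a stack: it computes a component label per node by iterating min-label propagation over the edge list to a fixpoint, then groups the P/T sums per label in one dict pass and compares them at the end.
-- outside the precondition, e.g. on solution([0, 1], [5], [], []): A returns False, B raises IndexError; on solution([0, 1, -1], [0, -2, 2, 2, 1], [0, 1, -2, 0], [-3, 1, -3, -1]): A returns False, B returns True
import Mathlib
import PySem

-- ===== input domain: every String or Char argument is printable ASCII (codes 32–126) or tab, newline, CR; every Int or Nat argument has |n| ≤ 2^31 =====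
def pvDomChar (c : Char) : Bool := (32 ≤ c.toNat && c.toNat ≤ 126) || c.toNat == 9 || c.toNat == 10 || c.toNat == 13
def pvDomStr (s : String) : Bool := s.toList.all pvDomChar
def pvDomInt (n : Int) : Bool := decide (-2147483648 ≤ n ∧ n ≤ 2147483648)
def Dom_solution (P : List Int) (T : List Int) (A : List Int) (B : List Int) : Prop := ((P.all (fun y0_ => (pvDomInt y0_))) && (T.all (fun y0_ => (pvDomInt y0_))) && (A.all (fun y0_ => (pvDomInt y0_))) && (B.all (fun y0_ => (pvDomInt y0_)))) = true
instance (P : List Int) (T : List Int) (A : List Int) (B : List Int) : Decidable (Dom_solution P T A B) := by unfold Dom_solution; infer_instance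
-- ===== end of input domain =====

-- ===== PORT A =====
-- A: builds adjacency lists, then an explicit-stack DFS per unvisited node,
-- comparing the component's P-sum and T-sum as soon as the component is exhausted.

-- adj[i].append(v) with a Python (possibly negative) index i
def pyAppendAt (adj : List (List Int)) (i : Int) (v : Int) : List (List Int) :=
  PySem.List.pySetD adj i (PySem.List.pyGetD adj i [] ++ [v])

-- body of 'for e in adj[v]: if not visited[e]: ...' ; state = (visited, up, down, q)
def solInner (P T : List Int) (st : List Bool × Int × Int × List Int) (e : Int) :
    List Bool × Int × Int × List Int :=
  if PySem.List.pyGetD st.1 e false then st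
  else (PySem.List.pySetD st.1 e true,
        st.2.1 + PySem.List.pyGetD P e 0,
        st.2.2.1 + PySem.List.pyGetD T e 0,
        st.2.2.2 ++ [e])

-- 'while q: v = q.pop(); for e in adj[v]: ...' (fuel makes the recursion structural;
-- fuel 2*l+1 dominates the loop measure, proved below)
def solWhile (P T : List Int) (adj : List (List Int)) :
    Nat → List Bool → Int → Int → List Int → List Bool × Int × Int
  | 0, visited, up, down, _ => (visited, up, down)
  | fuel + 1, visited, up, down, q =>
    if q = [] then (visited, up, down)
    else
      let v := PySem.List.pyGetD q (-1) 0
      let q' := q.dropLast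
      let st := (PySem.List.pyGetD adj v []).foldl (solInner P T) (visited, up, down, q')
      solWhile P T adj fuel st.1 st.2.1 st.2.2.1 st.2.2.2

-- 'for i in range(l): if not visited[i]: ... if up != down: return False'
def solOuter (P T : List Int) (adj : List (List Int)) (l : Nat) :
    List Nat → List Bool → Bool
  | [], _ => true
  | i :: rest, visited =>
    if visited.getD i false then solOuter P T adj l rest visited
    else
      let visited1 := visited.set i true
      let r := solWhile P T adj (2 * l + 1) visited1 (P.getD i 0) (T.getD i 0) [(i : Int)]
      if r.2.1 ≠ r.2.2 then false else solOuter P T adj l rest r.1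

def solution (P : List Int) (T : List Int) (A : List Int) (B : List Int) : Bool :=
  let l := P.length
  let m := A.length
  let adj := (List.range m).foldl
      (fun adj i => pyAppendAt (pyAppendAt adj (A.getD i 0) (B.getD i 0)) (B.getD i 0) (A.getD i 0))
      (List.replicate l [])
  solOuter P T adj l (List.range l) (List.replicate l false)

-- ===== PORT B =====
-- B: no adjacency lists, no stack: per-node component labels obtained by min-label
-- propagation over the raw edge list until a pass changes nothing, then one pass
-- grouping the P/T sums per label in a dict.

-- one edge of a propagation pass; state = (comp, changed)
def altStep (st : List Int × Bool) (ab : Int × Int) : List Int × Bool :=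
  if PySem.List.pyGetD st.1 ab.1 0 < PySem.List.pyGetD st.1 ab.2 0 then
    (PySem.List.pySetD st.1 ab.2 (PySem.List.pyGetD st.1 ab.1 0), true)
  else if PySem.List.pyGetD st.1 ab.2 0 < PySem.List.pyGetD st.1 ab.1 0 then
    (PySem.List.pySetD st.1 ab.1 (PySem.List.pyGetD st.1 ab.2 0), true)
  else st

-- 'while changed: changed = False; for a, b in zip(A, B): ...'
-- (fuel l*l+1 dominates the decreasing label sum, proved below)
def altLoop (E : List (Int × Int)) : Nat → List Int → List Int
  | 0, comp => comp
  | fuel + 1, comp =>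
    if (E.foldl altStep (comp, false)).2 then altLoop E fuel (E.foldl altStep (comp, false)).1
    else (E.foldl altStep (comp, false)).1

def solution_alt (P : List Int) (T : List Int) (A : List Int) (B : List Int) : Bool :=
  let l := P.length
  let comp := altLoop (A.zip B) (l * l + 1) (PySem.List.pyRange 0 (l : Int) 1)
  let sums := (List.range l).foldl
      (fun (d : PySem.Dict Int (Int × Int)) i =>
        let c := comp.getD i 0
        let pt := d.getD c (0, 0)
        d.insert c (pt.1 + P.getD i 0, pt.2 + T.getD i 0))
      PySem.Dict.empty
  sums.values.all (fun pt => pt.1 == pt.2)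

-- ===== PRECONDITION & SPEC =====
-- Pre_ restricts to the function's natural domain: edge endpoints must index the
-- node range (else A raises IndexError), B must be at least as long as A (else A
-- raises), and T must pair off with P — a T shorter than P makes A raise IndexError
-- unless it returns False before reading the missing entries (where B raises), and a
-- T longer than P is admitted only when all edge endpoints are nonnegative, because
-- a negative endpoint makes A read toy counts from the tail of the longer T, beyond
-- the node range (see the cited examples).
def Pre_solution (P : List Int) (T : List Int) (A : List Int) (B : List Int) : Prop :=
  A.length ≤ B.length ∧
  (∀ i < A.length, PySem.Raise.InRange P.length (A.getD i 0) ∧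
      PySem.Raise.InRange P.length (B.getD i 0)) ∧
  (T.length = P.length ∨
    (P.length ≤ T.length ∧ ∀ i < A.length, 0 ≤ A.getD i 0 ∧ 0 ≤ B.getD i 0))

instance (P : List Int) (T : List Int) (A : List Int) (B : List Int) :
    Decidable (Pre_solution P T A B) := by unfold Pre_solution; infer_instance

def pvWitness_solution : List Int × List Int × List Int × List Int :=
  ([3, 1], [1, 3], [0], [1])

def Spec_solution (P : List Int) (T : List Int) (A : List Int) (B : List Int) (out : Bool) : Prop :=
  out = solution_alt P T A B
instance (P : List Int) (T : List Int) (A : List Int) (B : List Int) (out : Bool) :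
    Decidable (Spec_solution P T A B out) := by unfold Spec_solution; infer_instance

-- ===== CLAIM (what is proved, stated in full; the proofs are below) =====
def Claim_equal_solution : Prop := ∀ (P : List Int) (T : List Int) (A : List Int) (B : List Int), Dom_solution P T A B → Pre_solution P T A B → Spec_solution P T A B (solution P T A B)

-- ===== LEMMAS AND PROOFS =====

-- normalised (Python) index into a length-l list
def nrm (l : Nat) (e : Int) : Nat := (if e < 0 then e + l else e).toNat

-- u and v are the two (normalised) ends of some edge of E
def EdgeOf (E : List (Int × Int)) (l : Nat) (u v : Nat) : Prop :=
  ∃ p ∈ E, (nrm l p.1 = u ∧ nrm l p.2 = v) ∨ (nrm l p.1 = v ∧ nrm l p.2 = u)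

-- connectivity: reflexive-transitive closure of the (symmetric) edge relation
def Conn (E : List (Int × Int)) (l : Nat) : Nat → Nat → Prop :=
  Relation.ReflTransGen (EdgeOf E l)

def GoodE (l : Nat) (E : List (Int × Int)) : Prop :=
  ∀ p ∈ E, PySem.Raise.InRange l p.1 ∧ PySem.Raise.InRange l p.2

-- the set of nodes marked in vis but not in vis0
def visSet (l : Nat) (vis vis0 : List Bool) : Finset Nat :=
  (Finset.range l).filter (fun k => vis.getD k false = true ∧ vis0.getD k false = false)

-- number of unvisited nodes (DFS loop measure)
def cfalse (l : Nat) (vis : List Bool) : Nat :=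
  ((Finset.range l).filter (fun k => vis.getD k false = false)).card

-- the class of i with classes read off from a labelling f
def fib (f : Nat → Int) (l : Nat) (i : Nat) : Finset Nat :=
  (Finset.range l).filter (fun k => f k = f i)

-- "component of i has equal P- and T-sums", classes read off from f
def EqS (P T : List Int) (f : Nat → Int) (l : Nat) (i : Nat) : Prop :=
  (∑ k ∈ fib f l i, P.getD k 0) = ∑ k ∈ fib f l i, T.getD k 0

-- DFS invariant; k0 is an exception node whose closure obligation is suspended
-- (k0 = l means: no exception)
structure DFSInvX (l : Nat) (E : List (Int × Int)) (P T : List Int) (vis0 : List Bool)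
    (i k0 : Nat) (vis : List Bool) (up down : Int) (q : List Int) : Prop where
  hlen : vis.length = l
  hmono : ∀ k, vis0.getD k false = true → vis.getD k false = true
  hq : ∀ e ∈ q, PySem.Raise.InRange l e ∧ vis.getD (nrm l e) false = true ∧ Conn E l i (nrm l e)
  hqnd : (q.map (nrm l)).Nodup
  hS : ∀ k ∈ visSet l vis vis0, Conn E l i k
  hi : i ∈ visSet l vis vis0
  hup : up = ∑ k ∈ visSet l vis vis0, P.getD k 0
  hdown : down = ∑ k ∈ visSet l vis vis0, T.getD k 0
  hclosed : ∀ k ∈ visSet l vis vis0, k ≠ k0 → (∀ e ∈ q, nrm l e ≠ k) →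
      ∀ v, EdgeOf E l k v → vis.getD v false = true

abbrev DFSInv (l : Nat) (E : List (Int × Int)) (P T : List Int) (vis0 : List Bool)
    (i : Nat) (vis : List Bool) (up down : Int) (q : List Int) : Prop :=
  DFSInvX l E P T vis0 i l vis up down q

-- ---- basic index lemmas ----

lemma nrm_lt {l : Nat} {e : Int} (h : PySem.Raise.InRange l e) : nrm l e < l := by
  rcases h with ⟨h1, h2⟩; unfold nrm; split <;> omega

lemma nrm_natCast {l : Nat} {k : Nat} (_h : k < l) : nrm l (k : Int) = k := by
  unfold nrm; split <;> omega

lemma pyIdx_eq_nrm {l : Nat} {e : Int} (h : PySem.Raise.InRange l e) :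
    PySem.List.pyIdx? l e = some (nrm l e) := by
  rcases h with ⟨h1, h2⟩
  unfold PySem.List.pyIdx? nrm
  by_cases hneg : e < 0
  · rw [if_neg (by omega : ¬ 0 ≤ e), if_pos h1, if_pos hneg]
    congr 1; omega
  · rw [if_pos (by omega : 0 ≤ e), if_pos h2, if_neg hneg]

lemma pyGetD_nrm {α : Type} {xs : List α} {l : Nat} {e : Int} (d : α)
    (hlen : xs.length = l) (h : PySem.Raise.InRange l e) :
    PySem.List.pyGetD xs e d = xs.getD (nrm l e) d := by
  have hk : nrm l e < l := nrm_lt h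
  simp [PySem.List.pyGetD, PySem.List.pyGet?, hlen, pyIdx_eq_nrm h, List.getD]

lemma pyGetD_nonneg_long {α : Type} {xs : List α} {l : Nat} {e : Int} (d : α)
    (hlen : l ≤ xs.length) (h0 : 0 ≤ e) (h1 : e < l) :
    PySem.List.pyGetD xs e d = xs.getD (nrm l e) d := by
  have hn : nrm l e = e.toNat := by unfold nrm; split <;> omega
  have : PySem.List.pyIdx? xs.length e = some e.toNat := by
    unfold PySem.List.pyIdx?; split_ifs <;> first | rfl | omega
  simp [PySem.List.pyGetD, PySem.List.pyGet?, this, hn, List.getD]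

lemma pySetD_nrm {α : Type} {xs : List α} {l : Nat} {e : Int} (v : α)
    (hlen : xs.length = l) (h : PySem.Raise.InRange l e) :
    PySem.List.pySetD xs e v = xs.set (nrm l e) v := by
  simp [PySem.List.pySetD, PySem.List.pySet?, hlen, pyIdx_eq_nrm h]

lemma getD_set_bool (vis : List Bool) (k j : Nat) (hk : k < vis.length) :
    (vis.set k true).getD j false = if j = k then true else vis.getD j false := by
  by_cases hj : j = k
  · subst hj; simp [List.getD, hk]
  · simp [List.getD, Ne.symm hj, hj]

lemma getD_replicate_false (l k : Nat) : (List.replicate l false).getD k false = false := by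
  by_cases h : k < l
  · simp [List.getD, h]
  · simp [List.getD, h]

-- ---- Conn basics ----

lemma edgeOf_symm {E : List (Int × Int)} {l : Nat} {u v : Nat} (h : EdgeOf E l u v) :
    EdgeOf E l v u := by
  rcases h with ⟨p, hp, h | h⟩ <;> exact ⟨p, hp, by tauto⟩

lemma conn_symm {E : List (Int × Int)} {l : Nat} {u v : Nat} (h : Conn E l u v) :
    Conn E l v u :=
  Relation.ReflTransGen.symmetric (fun _ _ hh => edgeOf_symm hh) h

lemma conn_trans {E : List (Int × Int)} {l : Nat} {u v w : Nat}
    (h1 : Conn E l u v) (h2 : Conn E l v w) : Conn E l u w :=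
  Relation.ReflTransGen.trans h1 h2

lemma edgeOf_lt {E : List (Int × Int)} {l : Nat} {u v : Nat} (hE : GoodE l E)
    (h : EdgeOf E l u v) : u < l ∧ v < l := by
  rcases h with ⟨p, hp, ⟨h1, h2⟩ | ⟨h1, h2⟩⟩ <;> rcases hE p hp with ⟨ha, hb⟩
  · exact ⟨h1 ▸ nrm_lt ha, h2 ▸ nrm_lt hb⟩
  · exact ⟨h2 ▸ nrm_lt hb, h1 ▸ nrm_lt ha⟩

lemma conn_lt {E : List (Int × Int)} {l : Nat} {u v : Nat} (hE : GoodE l E)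
    (hu : u < l) (h : Conn E l u v) : v < l := by
  induction h with
  | refl => exact hu
  | tail _ he ih => exact (edgeOf_lt hE he).2

-- ---- fib basics ----

lemma fib_congr {f : Nat → Int} {l i j : Nat} (h : f i = f j) : fib f l i = fib f l j := by
  unfold fib; apply Finset.filter_congr; intro k _; simp [h]

-- ---- adjacency construction ----

lemma length_pyAppendAt (adj : List (List Int)) (i v : Int) :
    (pyAppendAt adj i v).length = adj.length := by
  simp [pyAppendAt, PySem.List.length_pySetD]

lemma getD_pyAppendAt {l : Nat} (adj : List (List Int)) (i v : Int) (u : Nat)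
    (hlen : adj.length = l) (hi : PySem.Raise.InRange l i) :
    (pyAppendAt adj i v).getD u [] =
      if u = nrm l i then adj.getD u [] ++ [v] else adj.getD u [] := by
  unfold pyAppendAt
  rw [pySetD_nrm _ hlen hi, pyGetD_nrm _ hlen hi]
  have hk : nrm l i < l := nrm_lt hi
  by_cases hu : u = nrm l i
  · subst hu
    have hk' : nrm l i < adj.length := by omega
    simp [List.getD, hk']
  · simp [List.getD, hu, Ne.symm hu]

def adjStep (adj : List (List Int)) (p : Int × Int) : List (List Int) :=
  pyAppendAt (pyAppendAt adj p.1 p.2) p.2 p.1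

lemma length_adjFold (E : List (Int × Int)) (adj : List (List Int)) :
    (E.foldl adjStep adj).length = adj.length := by
  induction E generalizing adj with
  | nil => rfl
  | cons p E ih => simp [ih, adjStep, length_pyAppendAt]

lemma adj_char {l : Nat} (E : List (Int × Int)) (adj : List (List Int))
    (hE : GoodE l E) (hlen : adj.length = l) (u : Nat) (_hu : u < l) (e : Int) :
    e ∈ (E.foldl adjStep adj).getD u [] ↔
      e ∈ adj.getD u [] ∨
        ∃ p ∈ E, (nrm l p.1 = u ∧ e = p.2) ∨ (nrm l p.2 = u ∧ e = p.1) := by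
  induction E generalizing adj with
  | nil => simp
  | cons p E ih =>
    have hp := hE p (by simp)
    have hE' : GoodE l E := fun q hq => hE q (by simp [hq])
    have hlen1 : (pyAppendAt adj p.1 p.2).length = l := by
      rw [length_pyAppendAt]; exact hlen
    have hlen2 : (adjStep adj p).length = l := by
      simp [adjStep, length_pyAppendAt]; exact hlen
    rw [List.foldl_cons, ih (adjStep adj p) hE' hlen2]
    have h2 : (adjStep adj p).getD u [] =
        (if u = nrm l p.2 then
          (if u = nrm l p.1 then adj.getD u [] ++ [p.2] else adj.getD u []) ++ [p.1]
        else (if u = nrm l p.1 then adj.getD u [] ++ [p.2] else adj.getD u [])) := by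
      unfold adjStep
      rw [getD_pyAppendAt _ _ _ u hlen1 hp.2, getD_pyAppendAt _ _ _ u hlen hp.1]
    rw [h2]
    constructor
    · intro h
      rcases h with h | ⟨q, hq, hcase⟩
      · by_cases hB : u = nrm l p.2
        · by_cases hA : u = nrm l p.1
          · rw [if_pos hB, if_pos hA] at h
            rcases List.mem_append.mp h with h' | h'
            · rcases List.mem_append.mp h' with h'' | h''
              · exact Or.inl h''
              · exact Or.inr ⟨p, by simp, Or.inl ⟨hA.symm, by simpa using h''⟩⟩
            · exact Or.inr ⟨p, by simp, Or.inr ⟨hB.symm, by simpa using h'⟩⟩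
          · rw [if_pos hB, if_neg hA] at h
            rcases List.mem_append.mp h with h' | h'
            · exact Or.inl h'
            · exact Or.inr ⟨p, by simp, Or.inr ⟨hB.symm, by simpa using h'⟩⟩
        · by_cases hA : u = nrm l p.1
          · rw [if_neg hB, if_pos hA] at h
            rcases List.mem_append.mp h with h' | h'
            · exact Or.inl h'
            · exact Or.inr ⟨p, by simp, Or.inl ⟨hA.symm, by simpa using h'⟩⟩
          · rw [if_neg hB, if_neg hA] at h
            exact Or.inl h
      · exact Or.inr ⟨q, by simp [hq], hcase⟩
    · intro h
      rcases h with h | ⟨q, hq, hcase⟩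
      · have h' : e ∈ adj[u]?.getD [] := by simpa [List.getD] using h
        left; split_ifs <;> simp [List.getD, List.mem_append, h']
      · rcases List.mem_cons.mp hq with heq | hq'
        · left
          subst heq
          rcases hcase with ⟨h1, rfl⟩ | ⟨h1, rfl⟩
          · by_cases hB : u = nrm l q.2
            · rw [if_pos hB, if_pos h1.symm]; simp
            · rw [if_neg hB, if_pos h1.symm]; simp
          · rw [if_pos h1.symm]; simp
        · exact Or.inr ⟨q, hq', hcase⟩

-- 'for i in range(m)' over A/B getD is the fold over zip A B
lemma range_fold_eq_zip_fold {β : Type} (g : β → Int → Int → β) (A B : List Int) :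
    ∀ (m : Nat), m ≤ A.length → m ≤ B.length → ∀ (init : β),
      (List.range m).foldl (fun s i => g s (A.getD i 0) (B.getD i 0)) init =
        ((A.zip B).take m).foldl (fun s p => g s p.1 p.2) init := by
  intro m
  induction m with
  | zero => simp
  | succ m ih =>
    intro hA hB init
    have hm : m < (A.zip B).length := by simp [List.length_zip]; omega
    have : (A.zip B).take (m + 1) = (A.zip B).take m ++ [(A.zip B)[m]] := by
      rw [List.take_add_one]; simp [List.getElem?_eq_getElem hm]
    rw [List.range_succ, List.foldl_append, this, List.foldl_append,
        ih (by omega) (by omega)]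
    simp [List.getElem_zip, List.getD_eq_getElem?_getD,
      List.getElem?_eq_getElem (show m < A.length by omega),
      List.getElem?_eq_getElem (show m < B.length by omega)]

-- ---- visSet / cfalse ----

lemma mem_visSet {l : Nat} {vis vis0 : List Bool} {k : Nat} :
    k ∈ visSet l vis vis0 ↔
      k < l ∧ vis.getD k false = true ∧ vis0.getD k false = false := by
  unfold visSet; rw [Finset.mem_filter, Finset.mem_range]

lemma visSet_set {l : Nat} {vis vis0 : List Bool} {k : Nat}
    (hlen : vis.length = l) (hk : k < l) (hnew : vis.getD k false = false)
    (h0 : vis0.getD k false = false) :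
    visSet l (vis.set k true) vis0 = insert k (visSet l vis vis0) := by
  apply Finset.ext; intro j
  rw [mem_visSet, Finset.mem_insert, mem_visSet]
  rw [getD_set_bool vis k j (hlen ▸ hk)]
  by_cases hj : j = k
  · subst hj
    have h0' : vis0[j]?.getD false = false := h0
    simp [hk, h0']
  · simp [hj]

lemma cfalse_le (l : Nat) (vis : List Bool) : cfalse l vis ≤ l := by
  unfold cfalse
  calc ((Finset.range l).filter _).card ≤ (Finset.range l).card := Finset.card_filter_le _ _
    _ = l := Finset.card_range l

lemma cfalse_set {l : Nat} {vis : List Bool} {k : Nat}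
    (hlen : vis.length = l) (hk : k < l) (hnew : vis.getD k false = false) :
    cfalse l (vis.set k true) + 1 = cfalse l vis := by
  unfold cfalse
  have hset : (Finset.range l).filter (fun j => (vis.set k true).getD j false = false) =
      ((Finset.range l).filter (fun j => vis.getD j false = false)).erase k := by
    apply Finset.ext; intro j
    rw [Finset.mem_filter, Finset.mem_erase, Finset.mem_filter]
    rw [getD_set_bool vis k j (hlen ▸ hk)]
    by_cases hj : j = k
    · subst hj; simp
    · simp [hj]
  have hnew' : vis[k]?.getD false = false := hnew
  rw [hset, Finset.card_erase_of_mem (by simp [Finset.mem_filter, Finset.mem_range, hk, hnew'])]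
  have : 0 < ((Finset.range l).filter (fun j => vis.getD j false = false)).card :=
    Finset.card_pos.mpr ⟨k, by simp [Finset.mem_filter, Finset.mem_range, hk, hnew']⟩
  omega

-- ---- the inner 'for e in adj[v]' fold ----

lemma fold_inner {l : Nat} {E : List (Int × Int)} {P T : List Int} {vis0 : List Bool}
    {i k0 : Nat} :
    ∀ (ns : List Int) (vis : List Bool) (up down : Int) (q : List Int),
    (∀ e ∈ ns, PySem.Raise.InRange l e ∧
        PySem.List.pyGetD P e 0 = P.getD (nrm l e) 0 ∧
        PySem.List.pyGetD T e 0 = T.getD (nrm l e) 0 ∧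
        Conn E l i (nrm l e)) →
    DFSInvX l E P T vis0 i k0 vis up down q →
    DFSInvX l E P T vis0 i k0 (ns.foldl (solInner P T) (vis, up, down, q)).1
        (ns.foldl (solInner P T) (vis, up, down, q)).2.1
        (ns.foldl (solInner P T) (vis, up, down, q)).2.2.1
        (ns.foldl (solInner P T) (vis, up, down, q)).2.2.2
      ∧ (∀ k, vis.getD k false = true →
          (ns.foldl (solInner P T) (vis, up, down, q)).1.getD k false = true)
      ∧ (∀ e ∈ ns, (ns.foldl (solInner P T) (vis, up, down, q)).1.getD (nrm l e) false = true)
      ∧ 2 * cfalse l (ns.foldl (solInner P T) (vis, up, down, q)).1 +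
          (ns.foldl (solInner P T) (vis, up, down, q)).2.2.2.length
          ≤ 2 * cfalse l vis + q.length := by
  intro ns
  induction ns with
  | nil => intro vis up down q _ hJ; exact ⟨hJ, fun k h => h, by simp, le_refl _⟩
  | cons e ns ih =>
    intro vis up down q Hns hJ
    obtain ⟨hIR, hPe, hTe, hConn⟩ := Hns e (by simp)
    have Hns' : ∀ e' ∈ ns, _ := fun e' he' => Hns e' (by simp [he'])
    have hke : nrm l e < l := nrm_lt hIR
    by_cases hvis : PySem.List.pyGetD vis e false = true
    · -- already visited: state unchanged
      have hstep : solInner P T (vis, up, down, q) e = (vis, up, down, q) := by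
        simp [solInner, hvis]
      rw [List.foldl_cons, hstep]
      obtain ⟨hJ', hm, hns, hc⟩ := ih vis up down q Hns' hJ
      refine ⟨hJ', hm, ?_, hc⟩
      intro e' he'
      rcases List.mem_cons.mp he' with rfl | he'
      · exact hm _ (by rw [← pyGetD_nrm false hJ.hlen hIR]; exact hvis)
      · exact hns e' he'
    · -- newly discovered: mark, add to sums, push
      have hvisF : vis.getD (nrm l e) false = false := by
        rw [pyGetD_nrm false hJ.hlen hIR] at hvis
        cases h : vis.getD (nrm l e) false
        · rfl
        · exact absurd h hvis
      have hvis0F : vis0.getD (nrm l e) false = false := by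
        cases h : vis0.getD (nrm l e) false
        · rfl
        · exact absurd (hJ.hmono _ h) (by rw [hvisF]; simp)
      have hstep : solInner P T (vis, up, down, q) e =
          (vis.set (nrm l e) true, up + P.getD (nrm l e) 0, down + T.getD (nrm l e) 0,
            q ++ [e]) := by
        simp only [solInner]
        rw [if_neg (by simp [hvis])]
        rw [pySetD_nrm true hJ.hlen hIR, hPe, hTe]
      rw [List.foldl_cons, hstep]
      have hSet : visSet l (vis.set (nrm l e) true) vis0 =
          insert (nrm l e) (visSet l vis vis0) :=
        visSet_set hJ.hlen hke hvisF hvis0F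
      have hnotmem : nrm l e ∉ visSet l vis vis0 := by
        rw [mem_visSet]; rintro ⟨_, h, _⟩; rw [hvisF] at h; exact absurd h (by simp)
      have hJ1 : DFSInvX l E P T vis0 i k0 (vis.set (nrm l e) true)
          (up + P.getD (nrm l e) 0) (down + T.getD (nrm l e) 0) (q ++ [e]) := by
        refine ⟨by simp [hJ.hlen], ?_, ?_, ?_, ?_, ?_, ?_, ?_, ?_⟩
        · intro k h
          rw [getD_set_bool vis _ _ (hJ.hlen ▸ hke)]
          split
          · rfl
          · exact hJ.hmono k h
        · intro e' he'
          rcases List.mem_append.mp he' with he' | he'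
          · obtain ⟨h1, h2, h3⟩ := hJ.hq e' he'
            refine ⟨h1, ?_, h3⟩
            rw [getD_set_bool vis _ _ (hJ.hlen ▸ hke)]
            split
            · rfl
            · exact h2
          · simp at he'; subst he'
            refine ⟨hIR, ?_, hConn⟩
            rw [getD_set_bool vis _ _ (hJ.hlen ▸ hke)]; simp
        · rw [List.map_append]
          apply List.Nodup.append hJ.hqnd (by simp)
          intro x hx hx'
          simp only [List.map_cons, List.map_nil, List.mem_singleton] at hx'
          subst hx'
          rcases List.mem_map.mp hx with ⟨e', he', hne⟩
          obtain ⟨_, h2', _⟩ := hJ.hq e' he'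
          rw [hne, hvisF] at h2'
          exact absurd h2' (by simp)
        · intro k hk
          rw [hSet, Finset.mem_insert] at hk
          rcases hk with rfl | hk
          · exact hConn
          · exact hJ.hS k hk
        · rw [hSet]; exact Finset.mem_insert_of_mem hJ.hi
        · rw [hSet, Finset.sum_insert hnotmem, hJ.hup]; ring
        · rw [hSet, Finset.sum_insert hnotmem, hJ.hdown]; ring
        · intro k hk hk0 hq' v hv
          rw [hSet, Finset.mem_insert] at hk
          rcases hk with rfl | hk
          · exact absurd rfl (hq' e (by simp))
          · have := hJ.hclosed k hk hk0 (fun e' he' => hq' e' (by simp [he'])) v hv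
            rw [getD_set_bool vis _ _ (hJ.hlen ▸ hke)]
            split
            · rfl
            · exact this
      obtain ⟨hJ', hm, hns, hc⟩ := ih _ _ _ _ Hns' hJ1
      refine ⟨hJ', ?_, ?_, ?_⟩
      · intro k h
        apply hm
        rw [getD_set_bool vis _ _ (hJ.hlen ▸ hke)]
        split
        · rfl
        · exact h
      · intro e' he'
        rcases List.mem_cons.mp he' with rfl | he'
        · apply hm
          rw [getD_set_bool vis _ _ (hJ.hlen ▸ hke)]; simp
        · exact hns e' he'
      · have h1 := cfalse_set hJ.hlen hke hvisF
        have h2 : (q ++ [e]).length = q.length + 1 := by simp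
        omega

-- ---- the while loop ----

lemma while_spec {l : Nat} {E : List (Int × Int)} {P T : List Int}
    {adj : List (List Int)} {vis0 : List Bool} {i : Nat}
    (hAdjLen : adj.length = l)
    (hAdjSound : ∀ u, u < l → ∀ e ∈ adj.getD u [], PySem.Raise.InRange l e ∧
        PySem.List.pyGetD P e 0 = P.getD (nrm l e) 0 ∧
        PySem.List.pyGetD T e 0 = T.getD (nrm l e) 0 ∧
        EdgeOf E l u (nrm l e))
    (hAdjCompl : ∀ u v, u < l → EdgeOf E l u v → ∃ e ∈ adj.getD u [], nrm l e = v) :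
    ∀ (fuel : Nat) (vis : List Bool) (up down : Int) (q : List Int),
    DFSInv l E P T vis0 i vis up down q →
    2 * cfalse l vis + q.length ≤ fuel →
    ∃ vis' up' down', solWhile P T adj fuel vis up down q = (vis', up', down') ∧
      DFSInv l E P T vis0 i vis' up' down' [] := by
  intro fuel
  induction fuel with
  | zero =>
    intro vis up down q hInv hle
    have hq0 : q = [] := List.length_eq_zero_iff.mp (by omega)
    subst hq0
    exact ⟨vis, up, down, rfl, hInv⟩
  | succ fuel ih =>
    intro vis up down q hInv hle
    by_cases hq : q = []
    · subst hq; exact ⟨vis, up, down, by simp [solWhile], hInv⟩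
    · have hv : PySem.List.pyGetD q (-1) 0 = q.getLast hq := PySem.List.pyGetD_neg_one q 0 hq
      set v := q.getLast hq with hvdef
      have hvq : v ∈ q := List.getLast_mem hq
      obtain ⟨hvIR, hvvis, hvConn⟩ := hInv.hq v hvq
      set k0 := nrm l v with hk0def
      have hk0 : k0 < l := nrm_lt hvIR
      have hql : q = q.dropLast ++ [v] := (List.dropLast_append_getLast hq).symm
      set ns := adj.getD k0 [] with hnsdef
      have hnseq : PySem.List.pyGetD adj v [] = ns := pyGetD_nrm [] hAdjLen hvIR
      -- the invariant with the closure obligation suspended at k0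
      have hJ : DFSInvX l E P T vis0 i k0 vis up down q.dropLast := by
        refine ⟨hInv.hlen, hInv.hmono, ?_, ?_, hInv.hS, hInv.hi, hInv.hup, hInv.hdown, ?_⟩
        · intro e he; exact hInv.hq e (List.mem_of_mem_dropLast he)
        · exact hInv.hqnd.sublist (List.Sublist.map _ (List.dropLast_sublist q))
        · intro k hk hkk0 hq' w hw
          apply hInv.hclosed k hk (by have := mem_visSet.mp hk; omega)
          · intro e he
            rw [hql] at he
            rcases List.mem_append.mp he with he | he
            · exact hq' e he
            · simp at he; subst he; exact fun h => hkk0 h.symm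
          · exact hw
      have Hns : ∀ e ∈ ns, PySem.Raise.InRange l e ∧
          PySem.List.pyGetD P e 0 = P.getD (nrm l e) 0 ∧
          PySem.List.pyGetD T e 0 = T.getD (nrm l e) 0 ∧
          Conn E l i (nrm l e) := by
        intro e he
        obtain ⟨h1, h2, h3, h4⟩ := hAdjSound k0 hk0 e he
        exact ⟨h1, h2, h3, conn_trans hvConn (Relation.ReflTransGen.single h4)⟩
      obtain ⟨hJ', hm, hnsvis, hc⟩ := fold_inner ns vis up down q.dropLast Hns hJ
      set r := ns.foldl (solInner P T) (vis, up, down, q.dropLast) with hrdef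
      -- restore the full invariant: k0's neighbours are now all visited
      have hInv' : DFSInv l E P T vis0 i r.1 r.2.1 r.2.2.1 r.2.2.2 := by
        refine ⟨hJ'.hlen, hJ'.hmono, hJ'.hq, hJ'.hqnd, hJ'.hS, hJ'.hi, hJ'.hup, hJ'.hdown, ?_⟩
        intro k hk hkl hq' w hw
        by_cases hkk0 : k = k0
        · rw [hkk0] at hw
          obtain ⟨e, he, hne⟩ := hAdjCompl k0 w hk0 hw
          rw [← hne]
          exact hnsvis e he
        · exact hJ'.hclosed k hk hkk0 hq' w hw
      have step : solWhile P T adj (fuel + 1) vis up down q =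
          solWhile P T adj fuel r.1 r.2.1 r.2.2.1 r.2.2.2 := by
        conv_lhs => rw [solWhile]
        rw [if_neg hq]
        simp only [hv, hnseq, ← hrdef]
      rw [step]
      apply ih r.1 r.2.1 r.2.2.1 r.2.2.2 hInv'
      have hlq : q.length = q.dropLast.length + 1 := by
        rw [hql]; simp
      omega

-- ---- the final state of one DFS run ----

lemma inv_final {l : Nat} {E : List (Int × Int)} {P T : List Int} {vis0 : List Bool}
    {i : Nat} {vis : List Bool} {up down : Int}
    (hE : GoodE l E) (hil : i < l) (hvis0i : vis0.getD i false = false)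
    (hclosed0 : ∀ a b, a < l → vis0.getD a false = true → Conn E l a b →
        vis0.getD b false = true)
    (hInv : DFSInv l E P T vis0 i vis up down []) :
    (∀ k, k ∈ visSet l vis vis0 ↔ (k < l ∧ Conn E l i k)) ∧
    (∀ k, k < l → (vis.getD k false = true ↔ (vis0.getD k false = true ∨ Conn E l i k))) := by
  have hvisConn : ∀ k, Conn E l i k → vis.getD k false = true := by
    intro k hconn
    induction hconn with
    | refl => exact (mem_visSet.mp hInv.hi).2.1
    | @tail a b hia hab ihv =>
      have hal : a < l := conn_lt hE hil hia
      by_cases h0 : vis0.getD a false = true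
      · exact hInv.hmono _ (hclosed0 a b hal h0 (Relation.ReflTransGen.single hab))
      · have haS : a ∈ visSet l vis vis0 := by
          rw [mem_visSet]
          refine ⟨hal, ihv, ?_⟩
          cases h : vis0.getD a false
          · rfl
          · exact absurd h h0
        exact hInv.hclosed a haS (by omega) (by simp) b hab
  have hvis0Conn : ∀ k, Conn E l i k → vis0.getD k false = false := by
    intro k hconn
    cases h : vis0.getD k false
    · rfl
    · have hkl : k < l := conn_lt hE hil hconn
      exact absurd (hclosed0 k i hkl h (conn_symm hconn)) (by rw [hvis0i]; simp)
  constructor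
  · intro k
    rw [mem_visSet]
    constructor
    · intro ⟨h1, h2, h3⟩
      exact ⟨h1, hInv.hS k (mem_visSet.mpr ⟨h1, h2, h3⟩)⟩
    · intro ⟨h1, h2⟩
      exact ⟨h1, hvisConn k h2, hvis0Conn k h2⟩
  · intro k hkl
    constructor
    · intro h
      by_cases h0 : vis0.getD k false = true
      · exact Or.inl h0
      · refine Or.inr (hInv.hS k (mem_visSet.mpr ⟨hkl, h, ?_⟩))
        cases hh : vis0.getD k false
        · rfl
        · exact absurd hh h0
    · intro h
      rcases h with h | h
      · exact hInv.hmono _ h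
      · exact hvisConn k h

-- ---- the outer 'for i in range(l)' loop ----

lemma outer_spec {l : Nat} {E : List (Int × Int)} {P T : List Int}
    {adj : List (List Int)} {f : Nat → Int}
    (hE : GoodE l E)
    (hAdjLen : adj.length = l)
    (hAdjSound : ∀ u, u < l → ∀ e ∈ adj.getD u [], PySem.Raise.InRange l e ∧
        PySem.List.pyGetD P e 0 = P.getD (nrm l e) 0 ∧
        PySem.List.pyGetD T e 0 = T.getD (nrm l e) 0 ∧
        EdgeOf E l u (nrm l e))
    (hAdjCompl : ∀ u v, u < l → EdgeOf E l u v → ∃ e ∈ adj.getD u [], nrm l e = v)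
    (hbridge : ∀ j k, j < l → k < l → (Conn E l j k ↔ f j = f k)) :
    ∀ (rest : List Nat) (vis0 : List Bool),
    (∀ x ∈ rest, x < l) → vis0.length = l →
    (∀ a b, a < l → vis0.getD a false = true → Conn E l a b → vis0.getD b false = true) →
    (solOuter P T adj l rest vis0 = true ↔
      ∀ i ∈ rest, vis0.getD i false = false → EqS P T f l i) := by
  intro rest
  induction rest with
  | nil => intro vis0 _ _ _; simp [solOuter]
  | cons i rest ih =>
    intro vis0 hrl hv0len hv0cl
    have hil : i < l := hrl i (by simp)
    by_cases hv : vis0.getD i false = true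
    · rw [show solOuter P T adj l (i :: rest) vis0 = solOuter P T adj l rest vis0 from by
        rw [solOuter, if_pos hv]]
      rw [ih vis0 (fun x hx => hrl x (by simp [hx])) hv0len hv0cl]
      constructor
      · intro h i' hi' hvi'
        rcases List.mem_cons.mp hi' with rfl | hi'
        · rw [hv] at hvi'; exact absurd hvi' (by simp)
        · exact h i' hi' hvi'
      · intro h i' hi' hvi'; exact h i' (by simp [hi']) hvi'
    · have hvF : vis0.getD i false = false := by
        cases h : vis0.getD i false
        · rfl
        · exact absurd h hv
      set vis1 := vis0.set i true with hv1def
      have hv1len : vis1.length = l := by simp [hv1def, hv0len]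
      have hv1get : ∀ j, vis1.getD j false = if j = i then true else vis0.getD j false :=
        fun j => getD_set_bool vis0 i j (hv0len ▸ hil)
      have hSet1 : visSet l vis1 vis0 = {i} := by
        apply Finset.ext; intro j
        rw [mem_visSet, Finset.mem_singleton, hv1get j]
        by_cases hj : j = i
        · subst hj
          have hvF' : vis0[j]?.getD false = false := hvF
          simp [hil, hvF']
        · rw [if_neg hj]
          constructor
          · rintro ⟨_, h1, h2⟩
            rw [h1] at h2
            exact absurd h2 (by simp)
          · intro hji
            exact absurd hji hj
      have hInv0 : DFSInv l E P T vis0 i vis1 (P.getD i 0) (T.getD i 0) [(i : Int)] := by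
        unfold DFSInv
        refine ⟨hv1len, ?_, ?_, by simp, ?_, ?_, ?_, ?_, ?_⟩
        · intro k hk
          rw [hv1get k]
          split
          · rfl
          · exact hk
        · intro e he
          have he' : e = (i : Int) := List.mem_singleton.mp he
          subst he'
          refine ⟨⟨by omega, by exact_mod_cast hil⟩, ?_, ?_⟩
          · rw [nrm_natCast hil, hv1get i]; simp
          · rw [nrm_natCast hil]
            exact Relation.ReflTransGen.refl
        · rw [hSet1]; intro k hk
          rw [Finset.mem_singleton] at hk
          rw [hk]
          exact Relation.ReflTransGen.refl
        · rw [hSet1]; simp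
        · rw [hSet1]; simp
        · rw [hSet1]; simp
        · intro k hk _ hq'
          rw [hSet1, Finset.mem_singleton] at hk
          have hne := hq' (i : Int) (by simp)
          rw [nrm_natCast hil] at hne
          exact absurd hk.symm hne
      obtain ⟨vis', up', down', heq, hInv'⟩ :=
        while_spec hAdjLen hAdjSound hAdjCompl (2 * l + 1) vis1 (P.getD i 0) (T.getD i 0)
          [(i : Int)] hInv0 (by have := cfalse_le l vis1; simp; omega)
      obtain ⟨hmemS, hmemV⟩ := inv_final hE hil hvF hv0cl hInv'
      have hfibS : visSet l vis' vis0 = fib f l i := by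
        apply Finset.ext; intro k
        rw [hmemS k, fib, Finset.mem_filter, Finset.mem_range]
        constructor
        · intro ⟨h1, h2⟩; exact ⟨h1, ((hbridge i k hil h1).mp h2).symm⟩
        · intro ⟨h1, h2⟩; exact ⟨h1, (hbridge i k hil h1).mpr h2.symm⟩
      have hup' : up' = ∑ k ∈ fib f l i, P.getD k 0 := by rw [hInv'.hup, hfibS]
      have hdown' : down' = ∑ k ∈ fib f l i, T.getD k 0 := by rw [hInv'.hdown, hfibS]
      have hstep : solOuter P T adj l (i :: rest) vis0 =
          if up' ≠ down' then false else solOuter P T adj l rest vis' := by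
        rw [solOuter]
        rw [if_neg (by rw [hvF]; simp)]
        simp only [← hv1def, heq]
      by_cases hud : up' = down'
      · have hEqSi : EqS P T f l i := by unfold EqS; rw [← hup', ← hdown', hud]
        rw [hstep, if_neg (by simp [hud])]
        have hv'cl : ∀ a b, a < l → vis'.getD a false = true → Conn E l a b →
            vis'.getD b false = true := by
          intro a b hal hva hab
          have hbl : b < l := conn_lt hE hal hab
          rw [hmemV b hbl]
          rcases (hmemV a hal).mp hva with h | h
          · exact Or.inl (hv0cl a b hal h hab)
          · exact Or.inr (conn_trans h hab)
        rw [ih vis' (fun x hx => hrl x (by simp [hx])) hInv'.hlen hv'cl]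
        constructor
        · intro h i' hi' hvi'
          rcases List.mem_cons.mp hi' with rfl | hi'
          · exact hEqSi
          · by_cases hv'i' : vis'.getD i' false = true
            · have hi'l : i' < l := hrl i' (by simp [hi'])
              rcases (hmemV i' hi'l).mp hv'i' with hcase | hcase
              · rw [hvi'] at hcase; exact absurd hcase (by simp)
              · have : f i' = f i := (hbridge i i' hil hi'l).mp hcase ▸ rfl
                have hff : f i = f i' := (hbridge i i' hil hi'l).mp hcase
                unfold EqS; rw [fib_congr hff.symm]; exact hEqSi
            · refine h i' hi' ?_
              cases hh : vis'.getD i' false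
              · rfl
              · exact absurd hh hv'i'
        · intro h i' hi' hvi'
          apply h i' (by simp [hi'])
          cases hh : vis0.getD i' false
          · rfl
          · exact absurd (hInv'.hmono i' hh) (by rw [hvi']; simp)
      · rw [hstep, if_pos (by simp [hud])]
        constructor
        · intro h; exact absurd h (by simp)
        · intro h
          refine absurd ?_ hud
          have hh := h i (by simp) hvF
          unfold EqS at hh
          rw [← hup', ← hdown'] at hh
          exact hh

-- ---- assembling side A ----

lemma getD_replicate_nil (l k : Nat) : (List.replicate l ([] : List Int)).getD k [] = [] := by
  by_cases h : k < l
  · simp [List.getD, h]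
  · simp [List.getD, h]

lemma mem_zip_idx {A B : List Int} {p : Int × Int} (h : p ∈ A.zip B) :
    ∃ i, i < A.length ∧ i < B.length ∧ p.1 = A.getD i 0 ∧ p.2 = B.getD i 0 := by
  obtain ⟨i, hi, hp⟩ := List.mem_iff_getElem.mp h
  have hiA : i < A.length := by simp [List.length_zip] at hi; omega
  have hiB : i < B.length := by simp [List.length_zip] at hi; omega
  refine ⟨i, hiA, hiB, ?_, ?_⟩ <;>
    rw [← hp] <;>
    simp [List.getElem_zip, List.getD_eq_getElem?_getD,
      List.getElem?_eq_getElem hiA, List.getElem?_eq_getElem hiB]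

lemma pre_goodE {P T A B : List Int} (hpre : Pre_solution P T A B) :
    GoodE P.length (A.zip B) := by
  intro p hp
  obtain ⟨i, hiA, _, h1, h2⟩ := mem_zip_idx hp
  obtain ⟨hA, hB⟩ := hpre.2.1 i hiA
  rw [h1, h2]; exact ⟨hA, hB⟩

lemma pre_goodT {P T A B : List Int} (hpre : Pre_solution P T A B) :
    ∀ p ∈ A.zip B,
      PySem.List.pyGetD T p.1 0 = T.getD (nrm P.length p.1) 0 ∧
      PySem.List.pyGetD T p.2 0 = T.getD (nrm P.length p.2) 0 := by
  intro p hp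
  obtain ⟨i, hiA, _, h1, h2⟩ := mem_zip_idx hp
  obtain ⟨hA, hB⟩ := hpre.2.1 i hiA
  rcases hpre.2.2 with hT | ⟨hT, hpos⟩
  · exact ⟨pyGetD_nrm 0 hT (h1 ▸ hA), pyGetD_nrm 0 hT (h2 ▸ hB)⟩
  · obtain ⟨hA0, hB0⟩ := hpos i hiA
    exact ⟨pyGetD_nonneg_long 0 hT (h1 ▸ hA0) (h1 ▸ hA.2),
           pyGetD_nonneg_long 0 hT (h2 ▸ hB0) (h2 ▸ hB.2)⟩

lemma solution_iff {P T A B : List Int} (f : Nat → Int) (hpre : Pre_solution P T A B)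
    (hbridge : ∀ j k, j < P.length → k < P.length →
      (Conn (A.zip B) P.length j k ↔ f j = f k)) :
    (solution P T A B = true ↔ ∀ i < P.length, EqS P T f P.length i) := by
  set l := P.length with hl
  set E := A.zip B with hE
  have hEgood : GoodE l E := pre_goodE hpre
  have hTget := pre_goodT hpre
  have hzip_len : E.length = A.length := by
    rw [hE, List.length_zip]
    exact Nat.min_eq_left hpre.1
  have hadj : (List.range A.length).foldl
      (fun adj i => pyAppendAt (pyAppendAt adj (A.getD i 0) (B.getD i 0)) (B.getD i 0)
        (A.getD i 0)) (List.replicate l []) = E.foldl adjStep (List.replicate l []) := by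
    rw [range_fold_eq_zip_fold
        (fun s a b => pyAppendAt (pyAppendAt s a b) b a) A B A.length (le_refl _)
        hpre.1 (List.replicate l [])]
    rw [show (A.zip B).take A.length = A.zip B from
      List.take_of_length_le (by rw [hzip_len])]
    rfl
  set adjB := E.foldl adjStep (List.replicate l []) with hadjB
  have hsol : solution P T A B = solOuter P T adjB l (List.range l) (List.replicate l false) := by
    rw [show solution P T A B = solOuter P T ((List.range A.length).foldl
      (fun adj i => pyAppendAt (pyAppendAt adj (A.getD i 0) (B.getD i 0)) (B.getD i 0)
        (A.getD i 0)) (List.replicate l [])) l (List.range l) (List.replicate l false) from rfl]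
    rw [hadj]
  have hAdjLen : adjB.length = l := by
    rw [hadjB, length_adjFold, List.length_replicate]
  have hchar : ∀ u, u < l → ∀ e, e ∈ adjB.getD u [] ↔
      ∃ p ∈ E, (nrm l p.1 = u ∧ e = p.2) ∨ (nrm l p.2 = u ∧ e = p.1) := by
    intro u hu e
    rw [hadjB, adj_char E _ hEgood (by simp) u hu e, getD_replicate_nil]
    simp
  have hAdjSound : ∀ u, u < l → ∀ e ∈ adjB.getD u [], PySem.Raise.InRange l e ∧
      PySem.List.pyGetD P e 0 = P.getD (nrm l e) 0 ∧
      PySem.List.pyGetD T e 0 = T.getD (nrm l e) 0 ∧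
      EdgeOf E l u (nrm l e) := by
    intro u hu e he
    obtain ⟨p, hp, hcase⟩ := (hchar u hu e).mp he
    have hIR : PySem.Raise.InRange l e := by
      rcases hcase with ⟨_, rfl⟩ | ⟨_, rfl⟩
      · exact (hEgood p hp).2
      · exact (hEgood p hp).1
    refine ⟨hIR, pyGetD_nrm 0 rfl hIR, ?_, ?_⟩
    · rcases hcase with ⟨_, rfl⟩ | ⟨_, rfl⟩
      · exact (hTget p hp).2
      · exact (hTget p hp).1
    · rcases hcase with ⟨hu', rfl⟩ | ⟨hu', rfl⟩
      · exact ⟨p, hp, Or.inl ⟨hu', rfl⟩⟩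
      · exact ⟨p, hp, Or.inr ⟨rfl, hu'⟩⟩
  have hAdjCompl : ∀ u v, u < l → EdgeOf E l u v → ∃ e ∈ adjB.getD u [], nrm l e = v := by
    intro u v hu hedge
    rcases hedge with ⟨p, hp, ⟨h1, h2⟩ | ⟨h1, h2⟩⟩
    · exact ⟨p.2, (hchar u hu p.2).mpr ⟨p, hp, Or.inl ⟨h1, rfl⟩⟩, h2⟩
    · exact ⟨p.1, (hchar u hu p.1).mpr ⟨p, hp, Or.inr ⟨h2, rfl⟩⟩, h1⟩
  rw [hsol, outer_spec hEgood hAdjLen hAdjSound hAdjCompl hbridge (List.range l)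
      (List.replicate l false) (fun x hx => List.mem_range.mp hx) (by simp)
      (by intro a b _ h; rw [getD_replicate_false] at h; exact absurd h (by simp))]
  constructor
  · intro h i hi
    exact h i (List.mem_range.mpr hi) (getD_replicate_false l i)
  · intro h i hi _
    exact h i (List.mem_range.mp hi)

-- ---- side B: label propagation ----

def BInv (l : Nat) (E : List (Int × Int)) (comp : List Int) : Prop :=
  comp.length = l ∧ ∀ j, j < l → 0 ≤ comp.getD j 0 ∧ comp.getD j 0 < l ∧
    Conn E l j (comp.getD j 0).toNat

lemma getD_set_int (comp : List Int) (k j : Nat) (v : Int) (hk : k < comp.length) :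
    (comp.set k v).getD j 0 = if j = k then v else comp.getD j 0 := by
  by_cases hj : j = k
  · subst hj; simp [List.getD, hk]
  · simp [List.getD, hj, Ne.symm hj]

lemma sum_getD_decomp (comp : List Int) (k : Nat) (hk : k < comp.length) :
    comp.sum = (comp.take k).sum + comp.getD k 0 + (comp.drop (k + 1)).sum := by
  conv_lhs => rw [← List.take_append_drop k comp]
  rw [List.sum_append]
  rw [List.drop_eq_getElem_cons hk, List.sum_cons]
  simp [List.getD_eq_getElem?_getD, List.getElem?_eq_getElem hk]
  ring

lemma sum_set_lt (comp : List Int) (k : Nat) (v : Int) (hk : k < comp.length)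
    (hv : v < comp.getD k 0) : (comp.set k v).sum < comp.sum := by
  rw [List.sum_set, if_pos hk, sum_getD_decomp comp k hk]
  omega

lemma altStep_true (st : List Int × Bool) (p : Int × Int) (h : st.2 = true) :
    (altStep st p).2 = true := by
  unfold altStep; split_ifs <;> first | rfl | exact h

lemma pass_true (E : List (Int × Int)) :
    ∀ st : List Int × Bool, st.2 = true → (E.foldl altStep st).2 = true := by
  induction E with
  | nil => intro st h; exact h
  | cons p E ih => intro st h; rw [List.foldl_cons]; exact ih _ (altStep_true st p h)

lemma altStep_inv {l : Nat} {E : List (Int × Int)} (p : Int × Int)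
    (hp : PySem.Raise.InRange l p.1 ∧ PySem.Raise.InRange l p.2)
    (hpE : EdgeOf E l (nrm l p.1) (nrm l p.2))
    (st : List Int × Bool) (hI : BInv l E st.1) :
    BInv l E (altStep st p).1 ∧ (altStep st p).1.sum ≤ st.1.sum ∧
      ((altStep st p).2 = true → (st.2 = true ∨ (altStep st p).1.sum < st.1.sum)) := by
  obtain ⟨hlen, hent⟩ := hI
  have h1 : nrm l p.1 < l := nrm_lt hp.1
  have h2 : nrm l p.2 < l := nrm_lt hp.2
  have hg1 : PySem.List.pyGetD st.1 p.1 0 = st.1.getD (nrm l p.1) 0 := pyGetD_nrm 0 hlen hp.1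
  have hg2 : PySem.List.pyGetD st.1 p.2 0 = st.1.getD (nrm l p.2) 0 := pyGetD_nrm 0 hlen hp.2
  have hs1 : PySem.List.pySetD st.1 p.1 (st.1.getD (nrm l p.2) 0) =
      st.1.set (nrm l p.1) (st.1.getD (nrm l p.2) 0) := pySetD_nrm _ hlen hp.1
  have hs2 : PySem.List.pySetD st.1 p.2 (st.1.getD (nrm l p.1) 0) =
      st.1.set (nrm l p.2) (st.1.getD (nrm l p.1) 0) := pySetD_nrm _ hlen hp.2
  have hk1 : nrm l p.1 < st.1.length := by omega
  have hk2 : nrm l p.2 < st.1.length := by omega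
  unfold altStep
  rw [hg1, hg2]
  split_ifs with hxy hyx
  · -- comp[b] := x
    rw [hs2]
    have hlt := sum_set_lt st.1 (nrm l p.2) _ hk2 hxy
    refine ⟨⟨by simp [hlen], ?_⟩, le_of_lt hlt, fun _ => Or.inr hlt⟩
    intro j hj
    rw [getD_set_int _ _ _ _ hk2]
    by_cases hjk : j = nrm l p.2
    · subst hjk
      rw [if_pos rfl]
      obtain ⟨ha, hb, hc⟩ := hent (nrm l p.1) h1
      exact ⟨ha, hb, conn_trans (Relation.ReflTransGen.single (edgeOf_symm hpE)) hc⟩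
    · rw [if_neg hjk]
      exact hent j hj
  · -- comp[a] := y
    rw [hs1]
    have hlt := sum_set_lt st.1 (nrm l p.1) _ hk1 hyx
    refine ⟨⟨by simp [hlen], ?_⟩, le_of_lt hlt, fun _ => Or.inr hlt⟩
    intro j hj
    rw [getD_set_int _ _ _ _ hk1]
    by_cases hjk : j = nrm l p.1
    · subst hjk
      rw [if_pos rfl]
      obtain ⟨ha, hb, hc⟩ := hent (nrm l p.2) h2
      exact ⟨ha, hb, conn_trans (Relation.ReflTransGen.single hpE) hc⟩
    · rw [if_neg hjk]
      exact hent j hj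
  · exact ⟨⟨hlen, hent⟩, le_refl _, fun h => Or.inl h⟩

lemma edgeOf_of_mem {E : List (Int × Int)} {l : Nat} {p : Int × Int} (hp : p ∈ E) :
    EdgeOf E l (nrm l p.1) (nrm l p.2) := ⟨p, hp, Or.inl ⟨rfl, rfl⟩⟩

lemma pass_inv {l : Nat} {E : List (Int × Int)} :
    ∀ (E' : List (Int × Int)), (∀ p ∈ E', p ∈ E) → GoodE l E →
    ∀ (st : List Int × Bool), BInv l E st.1 →
    BInv l E (E'.foldl altStep st).1 ∧ (E'.foldl altStep st).1.sum ≤ st.1.sum ∧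
      ((E'.foldl altStep st).2 = true → (st.2 = true ∨ (E'.foldl altStep st).1.sum < st.1.sum)) := by
  intro E'
  induction E' with
  | nil => intro _ _ st hI; exact ⟨hI, le_refl _, fun h => Or.inl h⟩
  | cons p E' ih =>
    intro hsub hgood st hI
    have hp := hgood p (hsub p (by simp))
    have hstep := altStep_inv p hp (edgeOf_of_mem (hsub p (by simp))) st hI
    rw [List.foldl_cons]
    obtain ⟨hI', hle', himp'⟩ := ih (fun q hq => hsub q (by simp [hq])) hgood (altStep st p) hstep.1
    refine ⟨hI', le_trans hle' hstep.2.1, ?_⟩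
    intro h
    rcases himp' h with h2 | h2
    · rcases hstep.2.2 h2 with h3 | h3
      · exact Or.inl h3
      · exact Or.inr (lt_of_le_of_lt hle' h3)
    · exact Or.inr (lt_of_lt_of_le h2 hstep.2.1)

lemma altStep_false {st : List Int × Bool} {p : Int × Int}
    (h : (altStep st p).2 = false) :
    altStep st p = st ∧
      ¬ PySem.List.pyGetD st.1 p.1 0 < PySem.List.pyGetD st.1 p.2 0 ∧
      ¬ PySem.List.pyGetD st.1 p.2 0 < PySem.List.pyGetD st.1 p.1 0 := by
  by_cases h1 : PySem.List.pyGetD st.1 p.1 0 < PySem.List.pyGetD st.1 p.2 0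
  · exact absurd h (by unfold altStep; rw [if_pos h1]; simp)
  · by_cases h2 : PySem.List.pyGetD st.1 p.2 0 < PySem.List.pyGetD st.1 p.1 0
    · exact absurd h (by unfold altStep; rw [if_neg h1, if_pos h2]; simp)
    · refine ⟨?_, h1, h2⟩
      unfold altStep
      rw [if_neg h1, if_neg h2]

lemma pass_fix {l : Nat} {E : List (Int × Int)}
    (hE : GoodE l E) :
    ∀ (E' : List (Int × Int)), (∀ p ∈ E', p ∈ E) →
    ∀ (comp : List Int), comp.length = l →
    (E'.foldl altStep (comp, false)).2 = false →
    (E'.foldl altStep (comp, false)).1 = comp ∧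
      ∀ p ∈ E', comp.getD (nrm l p.1) 0 = comp.getD (nrm l p.2) 0 := by
  intro E'
  induction E' with
  | nil => intro _ comp _ _; exact ⟨rfl, by simp⟩
  | cons p E' ih =>
    intro hsub comp hclen hfix
    have hp := hE p (hsub p (by simp))
    have hg1 : PySem.List.pyGetD comp p.1 0 = comp.getD (nrm l p.1) 0 := pyGetD_nrm 0 hclen hp.1
    have hg2 : PySem.List.pyGetD comp p.2 0 = comp.getD (nrm l p.2) 0 := pyGetD_nrm 0 hclen hp.2
    rw [List.foldl_cons] at hfix
    have hs2 : (altStep (comp, false) p).2 = false := by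
      cases h : (altStep (comp, false) p).2
      · rfl
      · exact absurd hfix (by rw [pass_true E' _ h]; simp)
    obtain ⟨heq, hlt1, hlt2⟩ := altStep_false hs2
    rw [heq] at hfix
    obtain ⟨h1, h2⟩ := ih (fun q hq => hsub q (by simp [hq])) comp hclen hfix
    refine ⟨by rw [List.foldl_cons, heq, h1], ?_⟩
    intro q hq
    rcases List.mem_cons.mp hq with rfl | hq
    · rw [hg1, hg2] at hlt1 hlt2; omega
    · exact h2 q hq

lemma list_sum_le (xs : List Int) (b : Int) (h : ∀ x ∈ xs, x ≤ b) :
    xs.sum ≤ (xs.length : Int) * b := by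
  induction xs with
  | nil => simp
  | cons x xs ih =>
    have := ih (fun y hy => h y (by simp [hy]))
    have hx := h x (by simp)
    simp [List.sum_cons]
    nlinarith

lemma list_sum_nonneg_int (xs : List Int) (h : ∀ x ∈ xs, 0 ≤ x) : 0 ≤ xs.sum := by
  induction xs with
  | nil => simp
  | cons x xs ih =>
    have := ih (fun y hy => h y (by simp [hy]))
    have hx := h x (by simp)
    simp [List.sum_cons]; omega

lemma binv_sum_nonneg {l : Nat} {E : List (Int × Int)} {comp : List Int}
    (hI : BInv l E comp) : 0 ≤ comp.sum := by
  apply list_sum_nonneg_int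
  intro x hx
  obtain ⟨j, hj, hxj⟩ := List.mem_iff_getElem.mp hx
  have hlen := hI.1
  have h0 := (hI.2 j (by omega)).1
  rw [List.getD_eq_getElem?_getD, List.getElem?_eq_getElem hj] at h0
  simp at h0
  omega

lemma loop_spec {l : Nat} {E : List (Int × Int)} (hE : GoodE l E) :
    ∀ (fuel : Nat) (comp : List Int), BInv l E comp → comp.sum.toNat < fuel →
    BInv l E (altLoop E fuel comp) ∧
      ∀ p ∈ E, (altLoop E fuel comp).getD (nrm l p.1) 0 =
        (altLoop E fuel comp).getD (nrm l p.2) 0 := by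
  intro fuel
  induction fuel with
  | zero => intro comp _ h; omega
  | succ fuel ih =>
    intro comp hI hfuel
    rw [altLoop]
    cases hch : (E.foldl altStep (comp, false)).2
    · rw [if_neg (by simp)]
      obtain ⟨heq, hfix⟩ := pass_fix hE E (fun q hq => hq) comp hI.1 hch
      rw [heq]
      exact ⟨hI, hfix⟩
    · rw [if_pos rfl]
      obtain ⟨hI', hle, himp⟩ := pass_inv E (fun q hq => hq) hE (comp, false) hI
      have hlt : (E.foldl altStep (comp, false)).1.sum < comp.sum := by
        rcases himp hch with h | h
        · exact absurd h (by simp)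
        · exact h
      have hnn : 0 ≤ (E.foldl altStep (comp, false)).1.sum := binv_sum_nonneg hI'
      exact ih _ hI' (by omega)

-- the initial labelling list(range(l))
lemma comp0_len (l : Nat) : (PySem.List.pyRange 0 (l : Int) 1).length = l := by
  rw [PySem.List.length_pyRange_one]; omega

lemma comp0_getD (l : Nat) (j : Nat) (hj : j < l) :
    (PySem.List.pyRange 0 (l : Int) 1).getD j 0 = (j : Int) := by
  rw [List.getD_eq_getElem?_getD, PySem.List.getElem?_pyRange_one]
  rw [if_pos (by omega)]
  simp

lemma comp0_binv (l : Nat) (E : List (Int × Int)) :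
    BInv l E (PySem.List.pyRange 0 (l : Int) 1) := by
  refine ⟨comp0_len l, ?_⟩
  intro j hj
  rw [comp0_getD l j hj]
  refine ⟨by omega, by exact_mod_cast hj, ?_⟩
  simp only [Int.toNat_natCast]
  exact Relation.ReflTransGen.refl

lemma comp0_sum_lt (l : Nat) :
    ((PySem.List.pyRange 0 (l : Int) 1).sum).toNat < l * l + 1 := by
  have h1 : (PySem.List.pyRange 0 (l : Int) 1).sum ≤
      (((PySem.List.pyRange 0 (l : Int) 1).length : Int)) * l := by
    apply list_sum_le
    intro x hx
    have := (PySem.List.mem_pyRange_one.mp hx).2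
    omega
  rw [comp0_len l] at h1
  have h2 : ((l : Int) * l) = ((l * l : Nat) : Int) := by push_cast; ring
  rw [h2] at h1
  omega

-- the final labels classify exactly the connected components
lemma bridge_spec {l : Nat} {E : List (Int × Int)}
    (compF : List Int) (hI : BInv l E compF)
    (hfix : ∀ p ∈ E, compF.getD (nrm l p.1) 0 = compF.getD (nrm l p.2) 0) :
    ∀ j k, j < l → k < l → (Conn E l j k ↔ compF.getD j 0 = compF.getD k 0) := by
  have hedge : ∀ a b, EdgeOf E l a b → compF.getD a 0 = compF.getD b 0 := by
    intro a b hab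
    rcases hab with ⟨p, hp, ⟨h1, h2⟩ | ⟨h1, h2⟩⟩
    · rw [← h1, ← h2]; exact hfix p hp
    · rw [← h1, ← h2]; exact (hfix p hp).symm
  have fwd : ∀ a b, Conn E l a b → compF.getD a 0 = compF.getD b 0 := by
    intro a b hconn
    induction hconn with
    | refl => rfl
    | tail _ hab ih => rw [ih, hedge _ _ hab]
  intro j k hj hk
  constructor
  · exact fwd j k
  · intro heq
    obtain ⟨_, _, hcj⟩ := hI.2 j hj
    obtain ⟨_, _, hck⟩ := hI.2 k hk
    rw [heq] at hcj
    exact conn_trans hcj (conn_symm hck)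

-- ---- side B: the grouping dict ----

def dstep (compF P T : List Int) (d : PySem.Dict Int (Int × Int)) (i : Nat) :
    PySem.Dict Int (Int × Int) :=
  d.insert (compF.getD i 0)
    ((d.getD (compF.getD i 0) (0, 0)).1 + P.getD i 0,
     (d.getD (compF.getD i 0) (0, 0)).2 + T.getD i 0)

lemma dict_getD (compF P T : List Int) :
    ∀ (n : Nat) (c : Int),
    ((List.range n).foldl (dstep compF P T) PySem.Dict.empty).getD c (0, 0) =
      (∑ i ∈ (Finset.range n).filter (fun i => compF.getD i 0 = c), P.getD i 0,
       ∑ i ∈ (Finset.range n).filter (fun i => compF.getD i 0 = c), T.getD i 0) := by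
  intro n
  induction n with
  | zero => intro c; simp [PySem.Dict.getD_empty]
  | succ n ih =>
    intro c
    rw [List.range_succ, List.foldl_append, List.foldl_cons, List.foldl_nil]
    rw [Finset.range_add_one]
    rw [Finset.filter_insert]
    have hstep : ∀ (d : PySem.Dict Int (Int × Int)), dstep compF P T d n =
        d.insert (compF.getD n 0)
          ((d.getD (compF.getD n 0) (0, 0)).1 + P.getD n 0,
           (d.getD (compF.getD n 0) (0, 0)).2 + T.getD n 0) := fun d => rfl
    rw [hstep, PySem.Dict.getD_insert]
    by_cases hc : compF.getD n 0 = c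
    · rw [if_pos hc.symm, if_pos hc]
      rw [Finset.sum_insert (by simp), Finset.sum_insert (by simp)]
      rw [ih (compF.getD n 0), hc]
      simp [add_comm]
    · rw [if_neg (fun h => hc h.symm), if_neg hc, ih c]

lemma dict_keys (compF P T : List Int) (l : Nat) :
    ((List.range l).foldl (dstep compF P T) PySem.Dict.empty).keys =
      PySem.Set.ofList ((List.range l).map (fun i => compF.getD i 0)) := by
  rw [show (List.range l).foldl (dstep compF P T) PySem.Dict.empty =
      (List.range l).foldl (fun d i => d.insert ((fun i : Nat => compF.getD i 0) i)
        ((fun (d : PySem.Dict Int (Int × Int)) (i : Nat) =>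
          ((d.getD (compF.getD i 0) (0, 0)).1 + P.getD i 0,
           (d.getD (compF.getD i 0) (0, 0)).2 + T.getD i 0)) d i)) PySem.Dict.empty from rfl]
  rw [PySem.Dict.keys_foldl_insert_key]
  rw [show (PySem.Dict.empty : PySem.Dict Int (Int × Int)).keys = [] from rfl]
  exact PySem.Set.update_nil_left _

lemma dict_keys_nodup (compF P T : List Int) (l : Nat) :
    ((List.range l).foldl (dstep compF P T) PySem.Dict.empty).keys.Nodup := by
  apply PySem.Dict.nodup_keys_foldl_insert_key
  simp [PySem.Dict.keys_empty]

lemma alt_iff (P T A B : List Int) :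
    (solution_alt P T A B = true ↔
      ∀ i < P.length,
        EqS P T (fun k => (altLoop (A.zip B) (P.length * P.length + 1)
          (PySem.List.pyRange 0 (P.length : Int) 1)).getD k 0) P.length i) := by
  set l := P.length with hl
  set compF := altLoop (A.zip B) (l * l + 1)
    (PySem.List.pyRange 0 (l : Int) 1) with hcompF
  set key : Nat → Int := fun k => compF.getD k 0 with hkey
  have hsol : solution_alt P T A B =
      ((List.range l).foldl (dstep compF P T) PySem.Dict.empty).values.all
        (fun pt => pt.1 == pt.2) := rfl
  rw [hsol]
  set d := (List.range l).foldl (dstep compF P T) PySem.Dict.empty with hd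
  rw [PySem.Dict.values_eq_map_keys d (dict_keys_nodup compF P T l) (0, 0)]
  rw [List.all_map]
  rw [List.all_eq_true]
  constructor
  · intro h i hi
    have hmem : key i ∈ d.keys := by
      rw [hd, dict_keys]
      rw [PySem.Set.mem_ofList]
      exact List.mem_map.mpr ⟨i, List.mem_range.mpr hi, rfl⟩
    have := h (key i) hmem
    simp only [Function.comp] at this
    rw [hd, dict_getD compF P T l (key i)] at this
    rw [EqS]
    exact beq_iff_eq.mp this
  · intro h c hc
    rw [hd, dict_keys] at hc
    rw [PySem.Set.mem_ofList] at hc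
    obtain ⟨i, hi, rfl⟩ := List.mem_map.mp hc
    have := h i (List.mem_range.mp hi)
    rw [EqS] at this
    simp only [Function.comp]
    rw [hd, dict_getD compF P T l (compF.getD i 0)]
    exact beq_iff_eq.mpr this

-- ===== VERDICT (by name: the statement is the Claim_ definition above) =====
theorem solution_spec : Claim_equal_solution := by
  intro P T A B _ hpre
  unfold Spec_solution
  set l := P.length with hl
  set E := A.zip B with hE
  have hEgood : GoodE l E := pre_goodE hpre
  set compF := altLoop E (l * l + 1) (PySem.List.pyRange 0 (l : Int) 1) with hcompF
  obtain ⟨hIF, hfixF⟩ := loop_spec hEgood (l * l + 1)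
    (PySem.List.pyRange 0 (l : Int) 1) (comp0_binv l E) (comp0_sum_lt l)
  have hbridge := bridge_spec compF hIF hfixF
  rw [Bool.eq_iff_iff,
    solution_iff (fun k => compF.getD k 0) hpre hbridge,
    alt_iff P T A B]
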